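-- pv_equiv track=rewrite | github.com/ntgitis/Python | PY01039 - Kiem tra so dep.py | check
-- ===== SOURCE A (Python) =====
-- def check(n):
--     s = str(n)
--     a, b = s[0], s[1]
--     if len(s) < 2 : return "YES"
--     for i in range(len(s)-2):
--         if s[i] != s[i+2]:
--             return "NO"
--     return "YES"
-- ===== SOURCE B (Python) =====
-- def check(n):
--     s = str(n)
--     return "YES" if s[2:] == s[:-2] else "NO"
-- ===== Notes on version B (the rewrite author's own statement) =====
-- stated objective: simpler
-- what changed: B replaces A's index loop over pairs two apart with a single whole-string shift comparison: the digit string has period two iff s[2:] == s[:-2], one slice equality instead of a scan.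
import Mathlib
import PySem

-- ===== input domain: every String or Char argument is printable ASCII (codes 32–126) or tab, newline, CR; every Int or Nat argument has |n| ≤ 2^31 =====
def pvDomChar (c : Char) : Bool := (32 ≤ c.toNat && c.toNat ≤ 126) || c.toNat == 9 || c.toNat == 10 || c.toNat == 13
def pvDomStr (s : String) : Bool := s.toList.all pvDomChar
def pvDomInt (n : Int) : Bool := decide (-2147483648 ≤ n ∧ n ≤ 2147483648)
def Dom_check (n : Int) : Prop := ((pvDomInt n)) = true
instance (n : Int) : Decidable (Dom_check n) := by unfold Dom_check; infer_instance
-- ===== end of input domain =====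

-- B replaces A's index loop comparing digits two apart by one whole-string shift
-- comparison s[2:] == s[:-2]; equivalence is about the return value where A returns.

-- ===== PORT A =====
-- for i in range(len(s)-2): if s[i] != s[i+2]: return "NO"; afterwards "YES".
-- Indices i and i+2 are always in range here, so List.getD is exact for Python's s[i].
def loopA (s : List Char) : Nat → Nat → String
  | _, 0 => "YES"
  | i, k+1 => if s.getD i ' ' ≠ s.getD (i+2) ' ' then "NO" else loopA s (i+1) k

def check (n : Int) : String :=
  let s := PySem.Int.toChars n
  match PySem.List.pyGet? s 0, PySem.List.pyGet? s 1 with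
  | some _, some _ =>
      if s.length < 2 then "YES"
      else loopA s 0 (s.length - 2)
  | _, _ => ""   -- IndexError on a, b = s[0], s[1]: outside Pre_check

-- ===== PORT B =====
def check_alt (n : Int) : String :=
  let s := PySem.Int.toChars n
  if PySem.List.slice s (some 2) none == PySem.List.slice s none (some (-2))
  then "YES" else "NO"

-- ===== PRECONDITION & SPEC =====
-- A raises IndexError at 'a, b = s[0], s[1]' when str(n) is a single character
-- (0 ≤ n ≤ 9); exactly those inputs are excluded.
def Pre_check (n : Int) : Prop := 2 ≤ (PySem.Int.toChars n).length
instance (n : Int) : Decidable (Pre_check n) := by unfold Pre_check; infer_instance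
def pvWitness_check : Int := 121

def Spec_check (n : Int) (out : String) : Prop := out = check_alt n
instance (n : Int) (out : String) : Decidable (Spec_check n out) := by unfold Spec_check; infer_instance

-- ===== CLAIM (what is proved, stated in full; the proofs are below) =====
def Claim_equal_check : Prop := ∀ (n : Int), Dom_check n → Pre_check n → Spec_check n (check n)

-- ===== LEMMAS AND PROOFS =====

-- A's loop returns "YES" iff every compared pair of digits two apart agrees.
theorem loopA_eq_yes_iff (s : List Char) (k i : Nat) :
    loopA s i k = "YES" ↔ ∀ j < k, s.getD (i+j) ' ' = s.getD (i+j+2) ' ' := by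
  induction k generalizing i with
  | zero => simp [loopA]
  | succ k ih =>
    by_cases h : s.getD i ' ' = s.getD (i+2) ' '
    · have : loopA s i (k+1) = loopA s (i+1) k := by
        simp only [loopA]; rw [if_neg (fun hne => hne h)]
      rw [this, ih]
      constructor
      · intro hall j hj
        cases j with
        | zero => simpa using h
        | succ j =>
          have hx := hall j (by omega)
          have e : i + 1 + j = i + (j+1) := by omega
          rwa [e] at hx
      · intro hall j hj
        have hx := hall (j+1) (by omega)
        have e : i + (j+1) = i + 1 + j := by omega
        rwa [e] at hx
    · have : loopA s i (k+1) = "NO" := by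
        simp only [loopA]; rw [if_pos h]
      rw [this]
      constructor
      · intro hno; simp at hno
      · intro hall
        exact absurd (by simpa using hall 0 (Nat.succ_pos k)) h

theorem loopA_eq_no (s : List Char) (k i : Nat) (h : loopA s i k ≠ "YES") :
    loopA s i k = "NO" := by
  induction k generalizing i with
  | zero => simp [loopA] at h
  | succ k ih =>
    by_cases hc : s.getD i ' ' ≠ s.getD (i+2) ' '
    · simp only [loopA]; rw [if_pos hc]
    · simp only [loopA] at h ⊢
      rw [if_neg hc] at h ⊢
      exact ih _ h

-- The crux: "s shifted left by two equals s truncated by two" is exactly the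
-- chain condition "every digit equals the digit two positions later".
theorem shift_iff_chain (a b : Char) (t : List Char) :
    (List.drop 2 (a :: b :: t) = List.take t.length (a :: b :: t)) ↔
    (∀ j < t.length, (a :: b :: t).getD j ' ' = (a :: b :: t).getD (j+2) ' ') := by
  have hd : List.drop 2 (a :: b :: t) = t := by simp
  rw [hd]
  constructor
  · intro h j hj
    have hjs : j < (a :: b :: t).length := by simp; omega
    have h1 : (a :: b :: t).getD (j+2) ' ' = t.getD j ' ' := by
      simp
    have h2 : t[j] = (a :: b :: t)[j]'hjs := by
      rw [List.getElem_of_eq h hj]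
      exact List.getElem_take
    rw [h1, List.getD_eq_getElem t ' ' hj, List.getD_eq_getElem _ ' ' hjs, h2]
  · intro h
    apply List.ext_getElem
    · simp; omega
    · intro j hj hj'
      have hjt : j < t.length := hj
      have hjs : j < (a :: b :: t).length := by simp; omega
      have h1 := h j hjt
      have h2 : (a :: b :: t).getD (j+2) ' ' = t.getD j ' ' := by
        simp
      rw [h2, List.getD_eq_getElem t ' ' hjt, List.getD_eq_getElem _ ' ' hjs] at h1
      rw [show ((a :: b :: t).take t.length)[j] = (a :: b :: t)[j]'hjs from List.getElem_take]
      exact h1.symm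

-- Main list-level equivalence.
theorem core_eq (a b : Char) (t : List Char) :
    loopA (a :: b :: t) 0 ((a :: b :: t).length - 2) =
    (if PySem.List.slice (a :: b :: t) (some 2) none ==
        PySem.List.slice (a :: b :: t) none (some (-2)) then "YES" else "NO") := by
  have hlen : (a :: b :: t).length - 2 = t.length := by simp
  have hs1 : PySem.List.slice (a :: b :: t) (some 2) none = List.drop 2 (a :: b :: t) := by
    rw [PySem.List.slice_from (a :: b :: t) (by norm_num : (0:Int) ≤ 2)]
    simp
  have hs2 : PySem.List.slice (a :: b :: t) none (some (-2)) =
      List.take t.length (a :: b :: t) := by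
    rw [PySem.List.slice_to_neg_ofNat (a :: b :: t) 2 (by omega)]
    congr 1
  rw [hlen, hs1, hs2]
  have hY := loopA_eq_yes_iff (a :: b :: t) t.length 0
  simp only [Nat.zero_add] at hY
  by_cases hc : List.drop 2 (a :: b :: t) = List.take t.length (a :: b :: t)
  · rw [hY.2 ((shift_iff_chain a b t).1 hc), if_pos (by simpa using hc)]
  · rw [loopA_eq_no _ _ _ (fun hy => hc ((shift_iff_chain a b t).2 (hY.1 hy))),
        if_neg (by simpa using hc)]

-- ===== VERDICT (by name: the statement is the Claim_ definition above) =====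
theorem check_spec : Claim_equal_check := by
  intro n _ hpre
  unfold Spec_check check check_alt
  unfold Pre_check at hpre
  cases hs : PySem.Int.toChars n with
  | nil => simp [hs] at hpre
  | cons a rest =>
    cases rest with
    | nil => simp [hs] at hpre
    | cons b t =>
      have h1 : PySem.List.pyGet? (a :: b :: t) 1 = some b := by
        simp [PySem.List.pyGet?, PySem.List.pyIdx?]
      simp only [PySem.List.pyGet?_zero_cons, h1]
      rw [if_neg (by simp)]
      exact core_eq a b t
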